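-- pv_equiv track=rewrite | github.com/ahmola/ComputerScience | Algorithm/CodingTest/BruteForce/피로도.py | solution
-- ===== SOURCE A (Python) =====
-- from itertools import permutations
--
-- def solution(k, dungeons):
--     answer = -1
--
--     for per in permutations(range(len(dungeons)), len(dungeons)):
--         health = k
--         count = 0
--         for p in per:
--             least_health, loss_health = dungeons[p][0], dungeons[p][1]
--             if least_health <= health:
--                 count += 1
--                 health -= loss_health
--             else:
--                 break
--         answer = max(answer, count)
--
--     return answer
-- ===== SOURCE B (Python) =====
-- def solution(k, dungeons):
--     # DFS over remaining dungeons with pruning: a permutation's score after its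
--     # first unaffordable dungeon is fixed, so infeasible orderings are cut early.
--     def go(h, ds):
--         best = 0
--         for i in range(len(ds)):
--             if ds[i][0] <= h:
--                 v = 1 + go(h - ds[i][1], ds[:i] + ds[i + 1:])
--                 if v > best:
--                     best = v
--         return best
--     return go(k, dungeons)
-- ===== Notes on version B (the rewrite author's own statement) =====
-- stated objective: alternative
-- what changed: Replaces exhaustive enumeration of all n! index permutations (scoring each with a break) by a recursive DFS that only extends orderings while the next dungeon is still affordable, taking the max over branches.
import Mathlib
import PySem

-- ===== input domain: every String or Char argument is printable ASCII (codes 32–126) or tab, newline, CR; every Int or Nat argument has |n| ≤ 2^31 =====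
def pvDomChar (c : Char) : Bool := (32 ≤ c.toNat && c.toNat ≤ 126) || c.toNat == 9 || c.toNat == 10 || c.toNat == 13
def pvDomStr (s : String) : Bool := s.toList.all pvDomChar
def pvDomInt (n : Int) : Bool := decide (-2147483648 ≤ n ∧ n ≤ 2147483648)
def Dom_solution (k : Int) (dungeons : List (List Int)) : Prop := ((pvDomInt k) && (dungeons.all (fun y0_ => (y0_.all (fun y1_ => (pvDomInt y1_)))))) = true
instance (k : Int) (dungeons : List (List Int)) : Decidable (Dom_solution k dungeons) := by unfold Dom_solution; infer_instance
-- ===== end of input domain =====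

-- B replaces A's exhaustive scan of all n! index permutations by a recursive DFS over the
-- remaining dungeons that stops at the first unaffordable one (objective: alternative).

-- ===== PORT A =====
-- itertools.permutations(range(n), n): the standard 'pick each element first' recursion
def permsOf {α : Type} [Inhabited α] (l : List α) : List (List α) :=
  if _hl : l = [] then [[]]
  else
    (List.range l.length).attach.flatMap
      (fun i =>
        (permsOf (l.eraseIdx i.1)).map
          (fun rest => l.getD i.1 default :: rest))
termination_by l.length
decreasing_by
  have hi := List.mem_range.mp i.2
  simp [List.length_eraseIdx, hi]
  omega

-- A's inner 'for p in per' loop, threading (health, count), with break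
def runA (ds : List (List Int)) : Int → Int → List Int → Int
  | _, c, [] => c
  | h, c, p :: ps =>
    let least := PySem.List.pyGetD (PySem.List.pyGetD ds p []) 0 0
    let loss := PySem.List.pyGetD (PySem.List.pyGetD ds p []) 1 0
    if least ≤ h then runA ds (h - loss) (c + 1) ps else c

def solution (k : Int) (dungeons : List (List Int)) : Int :=
  (permsOf (PySem.List.pyRange 0 (dungeons.length : Int) 1)).foldl
    (fun answer per => max answer (runA dungeons k 0 per)) (-1)

-- ===== PORT B =====
-- go(h, ds): best = 0; for i in range(len(ds)):
--   if ds[i][0] <= h: v = 1 + go(h - ds[i][1], ds[:i] + ds[i+1:]); best = max(best, v)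
def go (h : Int) (ds : List (List Int)) : Int :=
  (List.range ds.length).attach.foldl
    (fun best i =>
      if PySem.List.pyGetD (PySem.List.pyGetD ds (i.1 : Int) []) 0 0 ≤ h then
        max best (1 + go (h - PySem.List.pyGetD (PySem.List.pyGetD ds (i.1 : Int) []) 1 0)
                        (ds.eraseIdx i.1))
      else best)
    0
termination_by ds.length
decreasing_by
  have hi := List.mem_range.mp i.2
  simp [List.length_eraseIdx, hi]
  omega

def solution_alt (k : Int) (dungeons : List (List Int)) : Int := go k dungeons

-- ===== PRECONDITION & SPEC =====
-- Pre_ excludes exactly the inputs on which Python A raises IndexError: some dungeon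
-- entry has fewer than 2 elements (every dungeon is visited first in some permutation).
def Pre_solution (k : Int) (dungeons : List (List Int)) : Prop :=
  ∀ d ∈ dungeons, 2 ≤ d.length
instance (k : Int) (dungeons : List (List Int)) : Decidable (Pre_solution k dungeons) := by
  unfold Pre_solution; infer_instance

def pvWitness_solution : Int × List (List Int) := (7, [[3, 2], [5, 1]])

def Spec_solution (k : Int) (dungeons : List (List Int)) (out : Int) : Prop := out = solution_alt k dungeons
instance (k : Int) (dungeons : List (List Int)) (out : Int) : Decidable (Spec_solution k dungeons out) := by unfold Spec_solution; infer_instance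

-- ===== CLAIM (what is proved, stated in full; the proofs are below) =====
def Claim_equal_solution : Prop := ∀ (k : Int) (dungeons : List (List Int)), Dom_solution k dungeons → Pre_solution k dungeons → Spec_solution k dungeons (solution k dungeons)

-- ===== LEMMAS AND PROOFS =====

-- greedy count along a fixed ordering of the dungeons themselves
def greedy : Int → List (List Int) → Int
  | _, [] => 0
  | h, d :: t =>
    if PySem.List.pyGetD d 0 0 ≤ h then 1 + greedy (h - PySem.List.pyGetD d 1 0) t else 0

theorem runA_eq (ds : List (List Int)) :
    ∀ (per : List Int) (h c : Int),
      runA ds h c per = c + greedy h (per.map (fun p => PySem.List.pyGetD ds p [])) := by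
  intro per
  induction per with
  | nil => intro h c; simp [runA, greedy]
  | cons p ps ih =>
    intro h c
    simp only [runA, greedy, List.map_cons]
    split
    · rw [ih]; omega
    · omega

theorem greedy_nonneg : ∀ (per : List (List Int)) (h : Int), 0 ≤ greedy h per := by
  intro per
  induction per with
  | nil => intro h; simp [greedy]
  | cons d t ih =>
    intro h
    simp only [greedy]
    split
    · have := ih (h - PySem.List.pyGetD d 1 0); omega
    · omega

theorem le_foldl_of_step {α : Type} (step : Int → α → Int) (hs : ∀ b i, b ≤ step b i) :
    ∀ (l : List α) (b : Int), b ≤ l.foldl step b := by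
  intro l
  induction l with
  | nil => intro b; simp
  | cons i t ih => intro b; exact le_trans (hs b i) (ih (step b i))

theorem go_nonneg (h : Int) (ds : List (List Int)) : 0 ≤ go h ds := by
  rw [go]
  apply le_foldl_of_step
  intro b i
  dsimp only
  split
  · exact le_max_left _ _
  · exact le_refl b

-- pull a 'max a _' out of a foldl of maxes
theorem foldl_max_pull {α : Type} (f : α → Int) :
    ∀ (l : List α) (a b : Int),
      l.foldl (fun x p => max x (f p)) (max a b) = max a (l.foldl (fun x p => max x (f p)) b) := by
  intro l
  induction l with
  | nil => intro a b; simp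
  | cons p t ih =>
    intro a b
    simp only [List.foldl_cons]
    rw [max_assoc, ih]

theorem foldl_max_add_one {α : Type} (g : α → Int) :
    ∀ (l : List α) (a : Int),
      l.foldl (fun x p => max x (1 + g p)) (1 + a) = 1 + l.foldl (fun x p => max x (g p)) a := by
  intro l
  induction l with
  | nil => intro a; simp
  | cons p t ih =>
    intro a
    simp only [List.foldl_cons]
    have hm : max (1 + a) (1 + g p) = 1 + max a (g p) := by omega
    rw [hm, ih]

theorem foldl_max_const0 {α : Type} :
    ∀ (l : List α) (b : Int), 0 ≤ b → l.foldl (fun x (_ : α) => max x 0) b = b := by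
  intro l
  induction l with
  | nil => intro b _; rfl
  | cons p t ih =>
    intro b hb
    simp only [List.foldl_cons]
    rw [max_eq_left hb]
    exact ih b hb

theorem foldl_max_zero {α : Type} (P : List α) (hP : P ≠ []) (a : Int) :
    P.foldl (fun x (_ : α) => max x 0) a = max a 0 := by
  cases P with
  | nil => exact absurd rfl hP
  | cons p t =>
    simp only [List.foldl_cons]
    exact foldl_max_const0 t (max a 0) (le_max_right a 0)

theorem foldl_max_shift {α : Type} (g : α → Int) (P : List α) (hg : ∀ p ∈ P, 0 ≤ g p)
    (hP : P ≠ []) (a : Int) :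
    P.foldl (fun x p => max x (1 + g p)) a
      = max a (1 + P.foldl (fun x p => max x (g p)) (-1)) := by
  cases P with
  | nil => exact absurd rfl hP
  | cons p t =>
    have hgp : 0 ≤ g p := hg p (List.mem_cons_self ..)
    simp only [List.foldl_cons]
    rw [max_eq_right (by omega : (-1 : Int) ≤ g p), foldl_max_pull (fun p => 1 + g p) t a (1 + g p),
      foldl_max_add_one g t (g p)]

theorem permsOf_ne_nil {α : Type} [Inhabited α] : ∀ (l : List α), permsOf l ≠ [] := by
  intro l
  induction hn : l.length using Nat.strong_induction_on generalizing l with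
  | _ n ih =>
    rw [permsOf]
    split
    · simp
    · rename_i hl
      intro hcon
      rw [List.flatMap_eq_nil_iff] at hcon
      have hlen : 0 < l.length := List.length_pos_of_ne_nil hl
      have h0 : (⟨0, List.mem_range.mpr hlen⟩ : {i // i ∈ List.range l.length}) ∈ (List.range l.length).attach := List.mem_attach _ _
      have := hcon _ h0
      simp only [List.map_eq_nil_iff] at this
      have hlt : (l.eraseIdx 0).length < n := by
        subst hn; simp [hlen]
      exact ih _ hlt (l.eraseIdx 0) rfl this

theorem permsOf_map {α β : Type} [Inhabited α] [Inhabited β] (f : α → β) :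
    ∀ (l : List α), permsOf (l.map f) = (permsOf l).map (List.map f) := by
  intro l
  induction hn : l.length using Nat.strong_induction_on generalizing l with
  | _ n ih =>
    by_cases hl : l = []
    · subst hl
      have h0 : permsOf ([] : List α) = [[]] := by rw [permsOf, dif_pos rfl]
      have h0' : permsOf ([] : List β) = [[]] := by rw [permsOf, dif_pos rfl]
      rw [List.map_nil, h0, h0']
      rfl
    · have hfl : l.map f ≠ [] := fun hc => hl (List.map_eq_nil_iff.mp hc)
      conv_lhs => rw [permsOf]
      conv_rhs => rw [permsOf]
      rw [dif_neg hfl, dif_neg hl, List.map_flatMap]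
      rw [List.length_map]
      apply List.flatMap_congr
      intro i _
      have hi := List.mem_range.mp i.2
      have hi' : i.1 < (l.map f).length := by simp [hi]
      have hlt : (l.eraseIdx i.1).length < n := by
        subst hn; simp [List.length_eraseIdx, hi]; omega
      rw [List.eraseIdx_map, ih _ hlt _ rfl, List.getD_eq_getElem _ _ hi',
        List.getD_eq_getElem _ _ hi, List.getElem_map]
      simp [List.map_map, Function.comp_def]

-- the body of A's outer fold over the permutations that start with index i
theorem inner_fold (ds : List (List Int)) (h : Int)
    (IH : ∀ ds' : List (List Int), ds'.length < ds.length → ∀ h' : Int,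
      (permsOf ds').foldl (fun a per => max a (greedy h' per)) (-1) = go h' ds') :
    ∀ (l : List {i // i ∈ List.range ds.length}) (a : Int), -1 ≤ a →
      (l.flatMap (fun i =>
          (permsOf (ds.eraseIdx i.1)).map
            (fun rest => ds.getD i.1 default :: rest))).foldl
        (fun a per => max a (greedy h per)) a
      = l.foldl (fun b i =>
          max b (if PySem.List.pyGetD (ds.getD i.1 default) 0 0 ≤ h then
                   1 + go (h - PySem.List.pyGetD (ds.getD i.1 default) 1 0)
                          (ds.eraseIdx i.1)
                 else 0)) a := by
  intro l
  induction l with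
  | nil => intro a _; rfl
  | cons i t iht =>
    intro a ha
    have hi := List.mem_range.mp i.2
    have hlt : (ds.eraseIdx i.1).length < ds.length := by
      simp [List.length_eraseIdx, hi]; omega
    simp only [List.flatMap_cons, List.foldl_append, List.foldl_cons, List.foldl_map]
    simp only [greedy]
    by_cases hc : PySem.List.pyGetD (ds.getD i.1 default) 0 0 ≤ h
    · simp only [if_pos hc]
      rw [foldl_max_shift _ _ (fun p _ => greedy_nonneg p _) (permsOf_ne_nil _) a,
        IH _ hlt _]
      exact iht _ (le_trans ha (le_max_left _ _))
    · simp only [if_neg hc]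
      rw [foldl_max_zero _ (permsOf_ne_nil _) a]
      exact iht _ (le_trans ha (le_max_left _ _))

theorem pyGetD_idx (ds : List (List Int)) (i : {i // i ∈ List.range ds.length}) :
    PySem.List.pyGetD ds (i.1 : Int) [] = ds.getD i.1 default := by
  rw [PySem.List.pyGetD_natCast]
  rfl

-- the fold of per-branch maxima equals B's fold, once the accumulator is nonnegative
theorem bridge (ds : List (List Int)) (h : Int) :
    ∀ (t : List {i // i ∈ List.range ds.length}) (b c : Int), 0 ≤ b → b = c →
      t.foldl (fun b i =>
          max b (if PySem.List.pyGetD (ds.getD i.1 default) 0 0 ≤ h then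
                   1 + go (h - PySem.List.pyGetD (ds.getD i.1 default) 1 0)
                          (ds.eraseIdx i.1)
                 else 0)) b
      = t.foldl (fun best i =>
          if PySem.List.pyGetD (PySem.List.pyGetD ds (i.1 : Int) []) 0 0 ≤ h then
            max best (1 + go (h - PySem.List.pyGetD (PySem.List.pyGetD ds (i.1 : Int) []) 1 0)
                            (ds.eraseIdx i.1))
          else best) c := by
  intro t
  induction t with
  | nil => intro b c _ hbc; exact hbc
  | cons i t iht =>
    intro b c hb hbc
    subst hbc
    simp only [List.foldl_cons, pyGetD_idx ds i]
    by_cases hc : PySem.List.pyGetD (ds.getD i.1 default) 0 0 ≤ h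
    · simp only [if_pos hc]
      exact iht _ _ (le_trans hb (le_max_left _ _)) rfl
    · simp only [if_neg hc, max_eq_left hb]
      exact iht _ _ hb rfl

theorem max_over_perms (n : Nat) :
    ∀ (ds : List (List Int)), ds.length < n → ∀ h : Int,
      (permsOf ds).foldl (fun a per => max a (greedy h per)) (-1) = go h ds := by
  induction n with
  | zero => intro ds hds; omega
  | succ n ih =>
    intro ds hlen h
    by_cases hds : ds = []
    · subst hds
      have h0 : permsOf ([] : List (List Int)) = [[]] := by rw [permsOf, dif_pos rfl]
      rw [h0, go]
      simp [greedy]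
    · have IH : ∀ ds' : List (List Int), ds'.length < ds.length → ∀ h' : Int,
          (permsOf ds').foldl (fun a per => max a (greedy h' per)) (-1) = go h' ds' :=
        fun ds' hl h' => ih ds' (by omega) h'
      rw [permsOf, dif_neg hds, inner_fold ds h IH _ (-1) (le_refl _), go]
      have hne : (List.range ds.length).attach ≠ [] := by
        intro hcon
        have hl := congrArg List.length hcon
        simp only [List.length_attach, List.length_range, List.length_nil] at hl
        exact absurd (List.length_eq_zero_iff.mp hl) hds
      obtain ⟨i, t, hit⟩ := List.exists_cons_of_ne_nil hne
      rw [hit]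
      simp only [List.foldl_cons]
      have hg := go_nonneg (h - PySem.List.pyGetD (ds.getD i.1 default) 1 0) (ds.eraseIdx i.1)
      refine bridge ds h t _ _ ?_ ?_
      · split
        · omega
        · omega
      · rw [pyGetD_idx ds i]
        split
        · omega
        · omega

theorem foldl_map_max (look : Int → List Int) (k : Int) :
    ∀ (L : List (List Int)) (a : Int),
      L.foldl (fun a per => max a (greedy k (per.map look))) a
        = (L.map (List.map look)).foldl (fun a per => max a (greedy k per)) a := by
  intro L
  induction L with
  | nil => intro a; rfl
  | cons per t ih => intro a; simp only [List.map_cons, List.foldl_cons]; exact ih _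

-- ===== VERDICT (by name: the statement is the Claim_ definition above) =====
theorem solution_spec : Claim_equal_solution := by
  intro k ds _ _
  unfold Spec_solution solution solution_alt
  simp only [runA_eq ds, zero_add]
  rw [foldl_map_max (fun p => PySem.List.pyGetD ds p []) k,
    ← permsOf_map, PySem.List.map_pyGetD_pyRange_zero']
  exact max_over_perms (ds.length + 1) ds (by omega) k
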